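-- pv_equiv track=rewrite | github.com/pypi-data/pypi-mirror-44 | packages/pyavb/pyavb-0.1.0.dev0.tar.gz/pyavb-0.1.0.dev0/avb/utils.py | int_from_bytes
-- ===== SOURCE A (Python) =====
-- def int_from_bytes(data, byte_order='big'):
--     num = 0
--     if byte_order == 'little':
--         for i, byte in enumerate(data):
--             num += byte << (i * 8)
--         return num
--     elif byte_order == 'big':
--         length = len(data) - 1
--         for i, byte in enumerate(data):
--             num += byte << ((length-i) * 8)
--         return num
--     else:
--         raise ValueError('endianess must be "little" or "big"')
-- ===== SOURCE B (Python) =====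
-- def int_from_bytes(data, byte_order='big'):
--     if byte_order == 'little':
--         seq = reversed(list(data))
--     elif byte_order == 'big':
--         seq = data
--     else:
--         raise ValueError('endianess must be "little" or "big"')
--     num = 0
--     for byte in seq:
--         num = num * 256 + byte
--     return num
-- ===== Notes on version B (the rewrite author's own statement) =====
-- stated objective: alternative
-- what changed: Replaces the enumerate-based positional shift-and-sum (byte << i*8 with explicit shift amounts) by Horner's method: a single accumulator num = num*256 + byte over the data (reversed for little-endian), with the same ValueError guard.
import Mathlib
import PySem

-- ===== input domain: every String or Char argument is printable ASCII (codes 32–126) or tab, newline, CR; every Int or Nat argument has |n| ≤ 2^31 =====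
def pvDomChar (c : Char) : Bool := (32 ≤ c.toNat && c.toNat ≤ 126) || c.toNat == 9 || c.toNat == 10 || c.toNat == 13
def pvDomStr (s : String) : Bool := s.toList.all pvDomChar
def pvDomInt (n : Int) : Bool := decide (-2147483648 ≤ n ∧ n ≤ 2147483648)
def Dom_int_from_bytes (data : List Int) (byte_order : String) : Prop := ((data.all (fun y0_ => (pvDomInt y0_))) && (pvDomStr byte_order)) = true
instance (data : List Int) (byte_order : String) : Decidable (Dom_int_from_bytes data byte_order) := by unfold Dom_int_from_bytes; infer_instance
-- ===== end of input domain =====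

-- B replaces A's per-byte explicit-shift positional sum by Horner's method (num = num*256 + byte),
-- reversing the list for little-endian; same ValueError guard (excluded by Pre_).

-- ===== PORT A =====
-- indices produced by enumerate start at 0, so (p.1*8).toNat and ((len-1-i)*8).toNat are exact shift amounts
def int_from_bytes (data : List Int) (byte_order : String) : Int :=
  if byte_order = "little" then
    (PySem.List.enumerate data 0).foldl (fun num p => num + p.2 * 2 ^ ((p.1 * 8).toNat)) 0
  else if byte_order = "big" then
    let length : Int := (data.length : Int) - 1
    (PySem.List.enumerate data 0).foldl (fun num p => num + p.2 * 2 ^ (((length - p.1) * 8).toNat)) 0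
  else 0  -- raise ValueError: excluded by Pre_

-- ===== PORT B =====
def int_from_bytes_alt (data : List Int) (byte_order : String) : Int :=
  if byte_order = "little" then
    data.reverse.foldl (fun num b => num * 256 + b) 0
  else if byte_order = "big" then
    data.foldl (fun num b => num * 256 + b) 0
  else 0  -- raise ValueError: excluded by Pre_

-- ===== PRECONDITION & SPEC =====
-- A raises ValueError for any byte_order other than "little"/"big"; those inputs are excluded.
def Pre_int_from_bytes (data : List Int) (byte_order : String) : Prop :=
  byte_order = "little" ∨ byte_order = "big"
instance (data : List Int) (byte_order : String) : Decidable (Pre_int_from_bytes data byte_order) := by unfold Pre_int_from_bytes; infer_instance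
def pvWitness_int_from_bytes : List Int × String := ([1, 2, 255], "big")

def Spec_int_from_bytes (data : List Int) (byte_order : String) (out : Int) : Prop := out = int_from_bytes_alt data byte_order
instance (data : List Int) (byte_order : String) (out : Int) : Decidable (Spec_int_from_bytes data byte_order out) := by unfold Spec_int_from_bytes; infer_instance

-- ===== CLAIM (what is proved, stated in full; the proofs are below) =====
def Claim_equal_int_from_bytes : Prop := ∀ (data : List Int) (byte_order : String), Dom_int_from_bytes data byte_order → Pre_int_from_bytes data byte_order → Spec_int_from_bytes data byte_order (int_from_bytes data byte_order)

-- ===== LEMMAS AND PROOFS =====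

/-- big-endian positional value of a byte list (reference form). -/
def posB : List Int → Int
  | [] => 0
  | b :: t => b * 256 ^ t.length + posB t

/-- little-endian positional value of a byte list (reference form). -/
def posL : List Int → Int
  | [] => 0
  | b :: t => b + 256 * posL t

theorem two_pow_mul8 (n : Nat) : (2 : Int) ^ (n * 8) = 256 ^ n := by
  rw [mul_comm, pow_mul]; norm_num

theorem horner_foldl (l : List Int) (c : Int) :
    l.foldl (fun num b => num * 256 + b) c = c * 256 ^ l.length + posB l := by
  induction l generalizing c with
  | nil => simp [posB]
  | cons b t ih =>
    simp only [List.foldl_cons, ih, posB, List.length_cons]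
    ring

theorem posB_append_singleton (l : List Int) (b : Int) :
    posB (l ++ [b]) = 256 * posB l + b := by
  induction l with
  | nil => simp [posB]
  | cons x t ih =>
    simp only [List.cons_append, posB, ih, List.length_append, List.length_cons]
    simp [pow_succ]
    ring

theorem posB_reverse (l : List Int) : posB l.reverse = posL l := by
  induction l with
  | nil => rfl
  | cons b t ih =>
    simp only [List.reverse_cons, posB_append_singleton, ih, posL]; ring

theorem enum_little (l : List Int) (s : Nat) (c : Int) :
    (PySem.List.enumerate l (s : Int)).foldl
      (fun num p => num + p.2 * 2 ^ ((p.1 * 8).toNat)) c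
      = c + 256 ^ s * posL l := by
  induction l generalizing s c with
  | nil => simp [PySem.List.enumerate_nil, posL]
  | cons b t ih =>
    rw [PySem.List.enumerate_cons, List.foldl_cons]
    have hcast : ((s : Int) + 1) = ((s + 1 : Nat) : Int) := by push_cast; ring
    rw [hcast, ih]
    have hto : ((s : Int) * 8).toNat = s * 8 := by omega
    rw [hto, two_pow_mul8, posL]
    simp [pow_succ]
    ring

theorem enum_big (t : List Int) (s : Nat) (c L : Int) (hL : L = (s : Int) + t.length - 1) :
    (PySem.List.enumerate t (s : Int)).foldl
      (fun num p => num + p.2 * 2 ^ (((L - p.1) * 8).toNat)) c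
      = c + posB t := by
  induction t generalizing s c with
  | nil => simp [PySem.List.enumerate_nil, posB]
  | cons b u ih =>
    rw [PySem.List.enumerate_cons, List.foldl_cons]
    have hcast : ((s : Int) + 1) = ((s + 1 : Nat) : Int) := by push_cast; ring
    rw [hcast, ih (s + 1) _ (by simp at hL ⊢; omega)]
    have hto : ((L - (s : Int)) * 8).toNat = u.length * 8 := by
      simp at hL; omega
    rw [hto, two_pow_mul8, posB]
    ring

-- ===== VERDICT (by name: the statement is the Claim_ definition above) =====
theorem int_from_bytes_spec : Claim_equal_int_from_bytes := by
  intro data byte_order _ hpre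
  unfold Spec_int_from_bytes int_from_bytes int_from_bytes_alt
  rcases hpre with h | h <;> subst h <;> simp only [if_true, if_neg (by decide : ¬ ("big" = "little"))]
  · -- little
    have h1 := enum_little data 0 0
    have h2 := horner_foldl data.reverse 0
    simp only [Int.natCast_zero] at h1
    rw [h1, h2, posB_reverse]
    simp
  · -- big
    have h1 := enum_big data 0 0 ((data.length : Int) - 1) (by push_cast; ring)
    have h2 := horner_foldl data 0
    simp only [Int.natCast_zero] at h1
    rw [h1, h2]
    simp
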